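-- pv_equiv track=rewrite | github.com/weiyangdaren/mmdetection3d | projects/OmniDet/tools/generate_split.py | get_split_set
-- ===== SOURCE A (Python) =====
-- def get_split_set(frame_id_list, scene, vehicle):
--     split_set = []
--     for i, frame_id in enumerate(frame_id_list):
--         this_set = {}
--         prev_id = frame_id_list[i-1] if i > 0 else ''
--         next_id = frame_id_list[i+1] if i < len(frame_id_list) - 1 else ''
--         weather = scene.split('-')[2]
--         this_set['scene_name'] = scene
--         this_set['vehicle_name'] = vehicle
--         this_set['weather'] = weather
--         this_set['frame_id'] = frame_id
--         this_set['prev_id'] = prev_id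
--         this_set['next_id'] = next_id
--         split_set.append(this_set)
--     return split_set
-- ===== SOURCE B (Python) =====
-- def get_split_set(frame_id_list, scene, vehicle):
--     if not frame_id_list:
--         return []
--     weather = scene.split('-')[2]
--     stack = list(frame_id_list)
--     rev = []
--     next_id = ''
--     while stack:
--         frame_id = stack.pop()
--         prev_id = stack[-1] if stack else ''
--         rev.append({'scene_name': scene,
--                     'vehicle_name': vehicle,
--                     'weather': weather,
--                     'frame_id': frame_id,
--                     'prev_id': prev_id,
--                     'next_id': next_id})
--         next_id = frame_id
--     rev.reverse()
--     return rev
-- ===== Notes on version B (the rewrite author's own statement) =====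
-- stated objective: alternative
-- what changed: Traverses the frames back-to-front via a stack (pop from the end), carrying the just-processed frame as next_id and peeking the stack top for prev_id, then reverses the accumulated list; no index arithmetic or boundary conditionals, and weather is computed once.
import Mathlib
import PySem

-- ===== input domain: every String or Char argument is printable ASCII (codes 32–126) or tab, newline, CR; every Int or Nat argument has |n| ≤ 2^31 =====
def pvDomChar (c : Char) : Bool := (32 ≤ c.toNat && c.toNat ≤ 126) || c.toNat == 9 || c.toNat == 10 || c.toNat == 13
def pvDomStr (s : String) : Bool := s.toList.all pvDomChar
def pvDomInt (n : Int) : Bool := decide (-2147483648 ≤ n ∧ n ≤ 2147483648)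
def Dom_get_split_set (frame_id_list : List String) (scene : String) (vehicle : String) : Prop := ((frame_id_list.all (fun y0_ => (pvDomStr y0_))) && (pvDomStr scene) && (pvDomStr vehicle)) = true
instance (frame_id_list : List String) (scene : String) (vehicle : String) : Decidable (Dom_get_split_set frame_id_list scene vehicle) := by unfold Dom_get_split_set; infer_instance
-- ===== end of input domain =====

-- B traverses the frames back-to-front via a stack, carrying the just-processed frame as
-- next_id and peeking the stack top for prev_id, then reverses (objective: alternative).

-- ===== PORT A =====
-- Literal port of A: fold over enumerate, per-iteration guarded index lookups and weather.
def get_split_set (frame_id_list : List String) (scene : String) (vehicle : String) : List (List (String × String)) :=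
  (PySem.List.enumerate frame_id_list).foldl
    (fun split_set p =>
      let i := p.1
      let frame_id := p.2
      let prev_id := if i > 0 then (PySem.List.pyGet? frame_id_list (i - 1)).getD "" else ""
      let next_id := if i < (frame_id_list.length : Int) - 1 then (PySem.List.pyGet? frame_id_list (i + 1)).getD "" else ""
      let weather := (PySem.List.pyGet? ((PySem.Str.split? scene "-").getD []) 2).getD ""
      split_set ++ [[("scene_name", scene), ("vehicle_name", vehicle), ("weather", weather),
                     ("frame_id", frame_id), ("prev_id", prev_id), ("next_id", next_id)]])
    []

-- ===== PORT B =====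
-- B's while loop pops from the END of the stack; the port consumes the REVERSED stack head
-- first (pop = head of reverse, stack[-1] after the pop = head of the remaining reversed
-- list), which is exact. rev.append is `++ [·]`, rev.reverse() is `.reverse` at the end.
def get_split_set_alt_go (scene vehicle weather : String) :
    List String → String → List (List (String × String)) → List (List (String × String))
  | [], _, rev => rev
  | frame_id :: rest, next_id, rev =>
      let prev_id := rest.headD ""
      get_split_set_alt_go scene vehicle weather rest frame_id
        (rev ++ [[("scene_name", scene), ("vehicle_name", vehicle), ("weather", weather),
                  ("frame_id", frame_id), ("prev_id", prev_id), ("next_id", next_id)]])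

def get_split_set_alt (frame_id_list : List String) (scene : String) (vehicle : String) : List (List (String × String)) :=
  match frame_id_list with
  | [] => []
  | _ =>
    let weather := (PySem.List.pyGet? ((PySem.Str.split? scene "-").getD []) 2).getD ""
    (get_split_set_alt_go scene vehicle weather frame_id_list.reverse "" []).reverse

-- ===== PRECONDITION & SPEC =====
-- Pre_ excludes exactly the inputs where A raises IndexError: a nonempty frame list with a
-- scene having fewer than three '-'-separated parts (weather = scene.split('-')[2] fails);
-- B raises there too.
def Pre_get_split_set (frame_id_list : List String) (scene : String) (vehicle : String) : Prop :=
  frame_id_list = [] ∨ 3 ≤ ((PySem.Str.split? scene "-").getD []).length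
instance (frame_id_list : List String) (scene : String) (vehicle : String) : Decidable (Pre_get_split_set frame_id_list scene vehicle) := by unfold Pre_get_split_set; infer_instance
def pvWitness_get_split_set : List String × String × String := (["f001", "f002"], "Town01-opt-ClearNoon", "ego")
def Spec_get_split_set (frame_id_list : List String) (scene : String) (vehicle : String) (out : List (List (String × String))) : Prop := out = get_split_set_alt frame_id_list scene vehicle
instance (frame_id_list : List String) (scene : String) (vehicle : String) (out : List (List (String × String))) : Decidable (Spec_get_split_set frame_id_list scene vehicle out) := by unfold Spec_get_split_set; infer_instance

-- ===== CLAIM (what is proved, stated in full; the proofs are below) =====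
def Claim_equal_get_split_set : Prop := ∀ (frame_id_list : List String) (scene : String) (vehicle : String), Dom_get_split_set frame_id_list scene vehicle → Pre_get_split_set frame_id_list scene vehicle → Spec_get_split_set frame_id_list scene vehicle (get_split_set frame_id_list scene vehicle)

-- ===== LEMMAS AND PROOFS =====

def pvEntry (scene vehicle weather fid prev next : String) : List (String × String) :=
  [("scene_name", scene), ("vehicle_name", vehicle), ("weather", weather),
   ("frame_id", fid), ("prev_id", prev), ("next_id", next)]

-- A's foldl-append over enumerate is a map over enumerate.
theorem foldl_append_map {α β : Type} (f : α → β) (l : List α) (acc : List β) :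
    l.foldl (fun s x => s ++ [f x]) acc = acc ++ l.map f := by
  induction l generalizing acc with
  | nil => simp
  | cons x xs ih => simp [List.foldl_cons, ih]

theorem get_split_set_eq_map (frame_id_list : List String) (scene : String) (vehicle : String) :
    get_split_set frame_id_list scene vehicle =
      (PySem.List.enumerate frame_id_list).map
        (fun p => pvEntry scene vehicle ((PySem.List.pyGet? ((PySem.Str.split? scene "-").getD []) 2).getD "")
          p.2
          (if p.1 > 0 then (PySem.List.pyGet? frame_id_list (p.1 - 1)).getD "" else "")
          (if p.1 < (frame_id_list.length : Int) - 1 then (PySem.List.pyGet? frame_id_list (p.1 + 1)).getD "" else "")) := by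
  unfold get_split_set
  exact foldl_append_map _ _ []

-- accumulator lemma for B's loop
theorem alt_go_acc (scene vehicle weather : String) (ys : List String) (n : String)
    (rev : List (List (String × String))) :
    get_split_set_alt_go scene vehicle weather ys n rev =
      rev ++ get_split_set_alt_go scene vehicle weather ys n [] := by
  induction ys generalizing n rev with
  | nil => simp [get_split_set_alt_go]
  | cons y ys ih =>
    simp only [get_split_set_alt_go]
    conv_lhs => rw [ih]
    conv_rhs => rw [ih]
    simp

theorem alt_go_length (scene vehicle weather : String) (ys : List String) (n : String) :
    (get_split_set_alt_go scene vehicle weather ys n []).length = ys.length := by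
  induction ys generalizing n with
  | nil => simp [get_split_set_alt_go]
  | cons y ys ih =>
    simp only [get_split_set_alt_go]
    rw [alt_go_acc]
    simp [ih]

theorem alt_go_get? (scene vehicle weather : String) (ys : List String) (n : String)
    (i : Nat) (hi : i < ys.length) :
    (get_split_set_alt_go scene vehicle weather ys n [])[i]? =
      some (pvEntry scene vehicle weather (ys[i]'hi) (ys[i+1]?.getD "")
        (if i = 0 then n else ys[i-1]!)) := by
  induction ys generalizing n i with
  | nil => simp at hi
  | cons y ys ih =>
    simp only [get_split_set_alt_go]
    rw [alt_go_acc]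
    cases i with
    | zero =>
      simp [pvEntry]
      cases ys <;> simp
    | succ j =>
      have hj : j < ys.length := by simpa using hi
      rw [List.getElem?_append_right (by simp)]
      simp only [List.nil_append, List.length_cons, List.length_nil, Nat.zero_add,
        Nat.add_sub_cancel]
      rw [ih y j hj]
      simp only [List.getElem_cons_succ, List.getElem?_cons_succ]
      cases j with
      | zero => simp
      | succ k =>
        have hk : k < ys.length := by omega
        simp [List.getElem!_eq_getElem?_getD, List.getElem?_eq_getElem hk]

theorem get_split_set_spec' (frame_id_list : List String) (scene : String) (vehicle : String) :
    get_split_set frame_id_list scene vehicle = get_split_set_alt frame_id_list scene vehicle := by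
  rw [get_split_set_eq_map]
  unfold get_split_set_alt
  cases h : frame_id_list with
  | nil => rfl
  | cons a as =>
    set xs := a :: as with hxs
    set weather := (PySem.List.pyGet? ((PySem.Str.split? scene "-").getD []) 2).getD "" with hw
    apply List.ext_getElem
    · simp [PySem.List.length_enumerate, alt_go_length]
    · intro i h1 h2
      have hi : i < xs.length := by simpa [PySem.List.length_enumerate] using h1
      simp only [List.getElem_map]
      rw [PySem.List.getElem_enumerate xs 0 i (by simpa [PySem.List.length_enumerate] using hi)]
      simp only [zero_add]
      rw [List.getElem_reverse]
      have hlen : (get_split_set_alt_go scene vehicle weather xs.reverse "" []).length = xs.length := by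
        rw [alt_go_length]; simp
      set k := (get_split_set_alt_go scene vehicle weather xs.reverse "" []).length - 1 - i with hk
      have hkv : k = xs.length - 1 - i := by rw [hk, hlen]
      have hkx : k < xs.reverse.length := by simp [hkv]; omega
      have hklen : k < (get_split_set_alt_go scene vehicle weather xs.reverse "" []).length := by
        rw [alt_go_length]; exact hkx
      have hg := alt_go_get? scene vehicle weather xs.reverse "" k hkx
      rw [List.getElem?_eq_getElem hklen, Option.some_inj] at hg
      rw [hg]
      have hrevlen : xs.reverse.length = xs.length := by simp
      -- frame_id component
      have hfid : xs.reverse[k]'hkx = xs[i]'hi := by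
        rw [List.getElem_reverse]
        congr 1
        simp [hkv]; omega
      -- prev component
      have hprev : xs.reverse[k+1]?.getD "" =
          (if (i : Int) > 0 then (PySem.List.pyGet? xs ((i : Int) - 1)).getD "" else "") := by
        rcases Nat.eq_zero_or_pos i with h0 | hpos
        · subst h0
          have : xs.reverse.length ≤ k + 1 := by simp [hkv]; omega
          rw [List.getElem?_eq_none this]
          simp
        · have hk1 : k + 1 < xs.reverse.length := by simp [hkv]; omega
          rw [List.getElem?_eq_getElem hk1, List.getElem_reverse]
          rw [if_pos (by exact_mod_cast hpos)]
          have hi1 : i - 1 < xs.length := by omega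
          rw [show ((i : Int) - 1) = ((i - 1 : Nat) : Int) by omega, PySem.List.pyGet?_natCast,
            List.getElem?_eq_getElem hi1]
          simp only [Option.getD_some]
          congr 1
          simp [hkv]; omega
      -- next component
      have hnext : (if k = 0 then "" else xs.reverse[k-1]!) =
          (if (i : Int) < (xs.length : Int) - 1 then (PySem.List.pyGet? xs ((i : Int) + 1)).getD "" else "") := by
        rcases Nat.lt_or_ge i (xs.length - 1) with hc | hc
        · have hk0 : k ≠ 0 := by simp [hkv]; omega
          rw [if_neg hk0, if_pos (by omega)]
          have hk1 : k - 1 < xs.reverse.length := by simp [hkv]; omega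
          have h1i : i + 1 < xs.length := by omega
          rw [List.getElem!_eq_getElem?_getD, List.getElem?_eq_getElem hk1, List.getElem_reverse]
          rw [show ((i : Int) + 1) = ((i + 1 : Nat) : Int) by omega, PySem.List.pyGet?_natCast,
            List.getElem?_eq_getElem h1i]
          simp only [Option.getD_some]
          congr 1
          simp [hkv]; omega
        · have hile : i = xs.length - 1 := by omega
          have hk0 : k = 0 := by simp [hkv]; omega
          rw [if_pos hk0, if_neg (by omega)]
      rw [hfid, hprev, hnext]

-- ===== VERDICT (by name: the statement is the Claim_ definition above) =====
theorem get_split_set_spec : Claim_equal_get_split_set := by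
  intro fl scene vehicle _ _
  exact get_split_set_spec' fl scene vehicle
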